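-- pv_equiv track=rewrite | github.com/Mark90/my-adventofcode-2020-py | day21/solution.py | part1
-- ===== SOURCE A (Python) =====
-- from collections import defaultdict
-- from collections import defaultdict
--
-- def part1(lines, full):
--     # 2317
--     allergen_ingredients = {}
--     all_ing = set()
--     ingcount = defaultdict(int)
--     for l in lines:
--         ing, alg = l.rstrip(")").split(" (contains ")
--         all_ing.update(ing.split())
--         for i in ing.split():
--             ingcount[i] += 1
--         for a in alg.split(", "):
--             if a not in allergen_ingredients:
--                 allergen_ingredients[a] = set(ing.split())
--             else:
--                 allergen_ingredients[a] &= set(ing.split())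
--
--     safe = all_ing.copy()
--     for k, v in allergen_ingredients.items():
--         safe -= v
--     # Return sum of safe ingredient occurrences
--     return sum(ingcount[s] for s in safe)
-- ===== SOURCE B (Python) =====
-- def part1(lines, full):
--     # phase 1: parse every line into (ingredient tokens, allergen list)
--     records = []
--     for l in lines:
--         ing, alg = l.rstrip(")").split(" (contains ")
--         records.append((ing.split(), alg.split(", ")))
--     # phase 2: for each allergen (first-appearance order), intersect the
--     # ingredient sets of the records mentioning it; union them into 'unsafe'
--     allergens = list(dict.fromkeys(a for _, algs in records for a in algs))
--     unsafe = set()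
--     for a in allergens:
--         cand = None
--         for toks, algs in records:
--             if a in algs:
--                 cand = set(toks) if cand is None else cand & set(toks)
--         unsafe |= cand
--     # phase 3: count occurrences of allergen-free ingredient tokens
--     return sum(1 for toks, _ in records for t in toks if t not in unsafe)
-- ===== Notes on version B (the rewrite author's own statement) =====
-- stated objective: alternative
-- what changed: A interleaves the occurrence counter, the ingredient universe and per-allergen set intersection inside one accumulating loop over the raw lines and then sums a count dict over the safe set; B is a three-phase pipeline: parse all lines into records, reduce each distinct allergen over the records mentioning it to build the flagged set, then recount token occurrences with a rescan (no count dict, no ingredient universe).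
import Mathlib
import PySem

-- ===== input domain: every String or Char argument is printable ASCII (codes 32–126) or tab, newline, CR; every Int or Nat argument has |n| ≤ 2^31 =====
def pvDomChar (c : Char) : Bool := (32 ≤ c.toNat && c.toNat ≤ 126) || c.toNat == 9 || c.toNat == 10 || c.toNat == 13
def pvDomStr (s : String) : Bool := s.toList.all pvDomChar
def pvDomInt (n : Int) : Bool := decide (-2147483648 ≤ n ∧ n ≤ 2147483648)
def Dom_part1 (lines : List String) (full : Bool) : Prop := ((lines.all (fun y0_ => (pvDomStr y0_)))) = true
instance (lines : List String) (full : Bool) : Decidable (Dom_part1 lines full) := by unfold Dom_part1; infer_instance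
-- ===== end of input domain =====

-- B restructures A's single accumulating loop into three phases (parse, per-allergen
-- intersection over the parsed records, then a recount of safe tokens); same result, no speed claim.

-- hand port of Python's  s.rstrip(")")  (strip only TRAILING ')' characters; exact)
def pyRstripParens (s : String) : String :=
  String.ofList ((s.toList.reverse.dropWhile (fun c => c = ')')).reverse)

-- ===== PORT A =====
def part1 (lines : List String) (full : Bool) : Int :=
  let st := lines.foldl
    (fun (st : PySem.Dict String (PySem.Set String) × PySem.Set String × PySem.Dict String Int) l =>
      let parts := (PySem.Str.split? (pyRstripParens l) " (contains ").getD []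
      let ing := parts.getD 0 ""
      let alg := parts.getD 1 ""
      let allIng := PySem.Set.update st.2.1 (PySem.Str.split₀ ing)
      let cnt := (PySem.Str.split₀ ing).foldl (fun d i => d.modify i 0 (· + 1)) st.2.2
      let ai := ((PySem.Str.split? alg ", ").getD []).foldl
        (fun d a =>
          if d.contains a then
            d.insert a (PySem.Set.inter (d.getD a PySem.Set.empty)
              (PySem.Set.ofList (PySem.Str.split₀ ing)))
          else
            d.insert a (PySem.Set.ofList (PySem.Str.split₀ ing))) st.1
      (ai, allIng, cnt))
    (PySem.Dict.empty, PySem.Set.empty, PySem.Dict.empty)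
  let safe := st.1.items.foldl (fun s kv => PySem.Set.diff s kv.2) st.2.1
  (safe.map (fun s => st.2.2.getD s 0)).sum

-- ===== PORT B =====
def part1_alt (lines : List String) (full : Bool) : Int :=
  let records := lines.map (fun l =>
    let parts := (PySem.Str.split? (pyRstripParens l) " (contains ").getD []
    (PySem.Str.split₀ (parts.getD 0 ""), (PySem.Str.split? (parts.getD 1 "") ", ").getD []))
  let allergens := PySem.List.dedup (records.flatMap (fun r => r.2))
  let flagged := allergens.foldl
    (fun (u : PySem.Set String) a =>
      let cand := records.foldl
        (fun (c : Option (PySem.Set String)) r =>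
          if r.2.contains a then
            match c with
            | none => some (PySem.Set.ofList r.1)
            | some s => some (PySem.Set.inter s (PySem.Set.ofList r.1))
          else c) none
      match cand with
      | none => u                  -- unreachable (a is drawn from the records); totality only
      | some s => PySem.Set.union u s)
    PySem.Set.empty
  records.foldl (fun acc r => acc + (r.1.countP (fun t => !(PySem.Set.contains flagged t)) : Int)) 0

-- ===== PRECONDITION & SPEC =====
-- Pre_ excludes exactly the lines on which Python A raises ValueError: the 2-way unpacking
-- 'ing, alg = l.rstrip(")").split(" (contains ")' needs the split to give exactly two pieces.
def Pre_part1 (lines : List String) (full : Bool) : Prop :=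
  ∀ l ∈ lines, ((PySem.Str.split? (pyRstripParens l) " (contains ").getD []).length = 2
instance (lines : List String) (full : Bool) : Decidable (Pre_part1 lines full) := by
  unfold Pre_part1; infer_instance

def pvWitness_part1 : List String × Bool :=
  (["mxmxvkd kfcds sqjhc nhms (contains dairy, fish)", "sqjhc mxmxvkd sbzzf (contains fish)"], true)

def Spec_part1 (lines : List String) (full : Bool) (out : Int) : Prop := out = part1_alt lines full
instance (lines : List String) (full : Bool) (out : Int) : Decidable (Spec_part1 lines full out) := by
  unfold Spec_part1; infer_instance

-- ===== CLAIM (what is proved, stated in full; the proofs are below) =====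
def Claim_equal_part1 : Prop := ∀ (lines : List String) (full : Bool), Dom_part1 lines full → Pre_part1 lines full → Spec_part1 lines full (part1 lines full)

-- ===== LEMMAS AND PROOFS =====

-- the parsed form of one line, shared by the analysis of both ports
def parseLine (l : String) : List String × List String :=
  let parts := (PySem.Str.split? (pyRstripParens l) " (contains ").getD []
  (PySem.Str.split₀ (parts.getD 0 ""), (PySem.Str.split? (parts.getD 1 "") ", ").getD [])

def flatToks (rs : List (List String × List String)) : List String := rs.flatMap (fun r => r.1)

-- 'a is an allergen of some record' / 'x is an ingredient of every record mentioning a'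
def HasAlg (rs : List (List String × List String)) (a : String) : Prop := ∃ r ∈ rs, a ∈ r.2
def InAll (rs : List (List String × List String)) (a x : String) : Prop :=
  ∀ r ∈ rs, a ∈ r.2 → x ∈ r.1

-- A's per-line allergen-dict update and the three accumulator folds
def algFold (as : List String) (T : PySem.Set String)
    (d : PySem.Dict String (PySem.Set String)) : PySem.Dict String (PySem.Set String) :=
  as.foldl
    (fun d a =>
      if d.contains a then d.insert a (PySem.Set.inter (d.getD a PySem.Set.empty) T)
      else d.insert a T) d

def stepAI (d : PySem.Dict String (PySem.Set String)) (r : List String × List String) :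
    PySem.Dict String (PySem.Set String) := algFold r.2 (PySem.Set.ofList r.1) d

def foldAI (d : PySem.Dict String (PySem.Set String)) (rs : List (List String × List String)) :
    PySem.Dict String (PySem.Set String) := rs.foldl stepAI d

def foldAll (s : PySem.Set String) (rs : List (List String × List String)) : PySem.Set String :=
  rs.foldl (fun s r => PySem.Set.update s r.1) s

def foldCnt (d : PySem.Dict String Int) (rs : List (List String × List String)) :
    PySem.Dict String Int :=
  rs.foldl (fun d r => r.1.foldl (fun d i => d.modify i 0 (· + 1)) d) d

def combinedStep
    (st : PySem.Dict String (PySem.Set String) × PySem.Set String × PySem.Dict String Int)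
    (r : List String × List String) :
    PySem.Dict String (PySem.Set String) × PySem.Set String × PySem.Dict String Int :=
  (stepAI st.1 r, PySem.Set.update st.2.1 r.1,
    r.1.foldl (fun d i => d.modify i 0 (· + 1)) st.2.2)

def finalA (rs : List (List String × List String)) : Int :=
  let st := rs.foldl combinedStep (PySem.Dict.empty, PySem.Set.empty, PySem.Dict.empty)
  let safe := st.1.items.foldl (fun s kv => PySem.Set.diff s kv.2) st.2.1
  (safe.map (fun s => st.2.2.getD s 0)).sum

lemma part1_eq_finalA (lines : List String) (full : Bool) :
    part1 lines full = finalA (lines.map parseLine) := by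
  unfold part1 finalA combinedStep stepAI algFold parseLine
  rw [List.foldl_map]

lemma foldl_triple (rs : List (List String × List String))
    (d : PySem.Dict String (PySem.Set String)) (s : PySem.Set String)
    (c : PySem.Dict String Int) :
    rs.foldl combinedStep (d, s, c) = (foldAI d rs, foldAll s rs, foldCnt c rs) := by
  induction rs generalizing d s c with
  | nil => rfl
  | cons r rs ih => simp [foldAI, foldAll, foldCnt, List.foldl_cons, combinedStep] at *; exact ih _ _ _

lemma foldCnt_getD (rs : List (List String × List String)) (d : PySem.Dict String Int)
    (t : String) :
    (foldCnt d rs).getD t 0 = d.getD t 0 + ((flatToks rs).count t : Int) := by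
  induction rs generalizing d with
  | nil => simp [foldCnt, flatToks]
  | cons r rs ih =>
      simp only [foldCnt, List.foldl_cons] at *
      rw [ih, PySem.Dict.getD_foldl_modify_add_one]
      simp [flatToks, List.count_append]
      ring

lemma mem_foldAll (rs : List (List String × List String)) (s : PySem.Set String) (x : String) :
    x ∈ foldAll s rs ↔ x ∈ s ∨ x ∈ flatToks rs := by
  induction rs generalizing s with
  | nil => simp [foldAll, flatToks]
  | cons r rs ih =>
      simp only [foldAll, List.foldl_cons] at *
      rw [ih, PySem.Set.mem_update]
      simp [flatToks]
      tauto

lemma nodup_foldAll (rs : List (List String × List String)) (s : PySem.Set String)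
    (h : s.Nodup) : (foldAll s rs).Nodup := by
  induction rs generalizing s with
  | nil => exact h
  | cons r rs ih => exact ih _ (PySem.Set.nodup_update _ _ h)

def memV (d : PySem.Dict String (PySem.Set String)) (a x : String) : Prop :=
  ∃ s, d.get? a = some s ∧ x ∈ s

lemma algFold_none (as : List String) (T : PySem.Set String)
    (d : PySem.Dict String (PySem.Set String)) (a : String) :
    (algFold as T d).get? a = none ↔ d.get? a = none ∧ a ∉ as := by
  induction as generalizing d with
  | nil => simp [algFold]
  | cons a0 as ih =>
      simp only [algFold, List.foldl_cons] at *
      rw [ih]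
      by_cases h : a = a0
      · subst h
        split_ifs with hc <;> simp [PySem.Dict.get?_insert_self]
      · split_ifs with hc <;>
          simp [PySem.Dict.get?_insert_of_ne _ _ h, h, List.mem_cons]

-- one iteration of A's allergen loop
def algStep (d : PySem.Dict String (PySem.Set String)) (a0 : String) (T : PySem.Set String) :
    PySem.Dict String (PySem.Set String) :=
  if d.contains a0 then d.insert a0 (PySem.Set.inter (d.getD a0 PySem.Set.empty) T)
  else d.insert a0 T

lemma algStep_memV (d : PySem.Dict String (PySem.Set String)) (a0 : String)
    (T : PySem.Set String) (x : String) :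
    memV (algStep d a0 T) a0 x ↔ x ∈ T ∧ (memV d a0 x ∨ d.get? a0 = none) := by
  unfold algStep
  by_cases hc : d.contains a0 = true
  · obtain ⟨v, hv⟩ : ∃ v, d.get? a0 = some v := by
      have h2 := PySem.Dict.contains_eq_isSome_get? d a0
      rw [hc] at h2
      exact Option.isSome_iff_exists.mp h2.symm
    have hg := PySem.Dict.getD_of_get?_eq_some (d := d) PySem.Set.empty hv
    rw [if_pos hc]
    constructor
    · rintro ⟨s, hs, hxs⟩
      rw [PySem.Dict.get?_insert_self] at hs
      obtain rfl := Option.some_inj.mp hs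
      rw [PySem.Set.mem_inter, hg] at hxs
      exact ⟨hxs.2, Or.inl ⟨v, hv, hxs.1⟩⟩
    · rintro ⟨hT, hrest⟩
      refine ⟨_, PySem.Dict.get?_insert_self _ _ _, ?_⟩
      rw [PySem.Set.mem_inter, hg]
      rcases hrest with ⟨s, hs, hxs⟩ | hn
      · rw [hv] at hs
        obtain rfl := Option.some_inj.mp hs
        exact ⟨hxs, hT⟩
      · rw [hv] at hn
        cases hn
  · have hn : d.get? a0 = none := by
      cases hgg : d.get? a0 with
      | none => rfl
      | some v => rw [PySem.Dict.contains_eq_isSome_get?, hgg] at hc; simp at hc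
    rw [if_neg hc]
    simp [memV, PySem.Dict.get?_insert_self, hn]

lemma algStep_get?_ne (d : PySem.Dict String (PySem.Set String)) (a0 : String)
    (T : PySem.Set String) {a : String} (h : a ≠ a0) :
    (algStep d a0 T).get? a = d.get? a := by
  unfold algStep
  split_ifs <;> exact PySem.Dict.get?_insert_of_ne _ _ h

lemma algStep_get?_self_ne_none (d : PySem.Dict String (PySem.Set String)) (a0 : String)
    (T : PySem.Set String) : (algStep d a0 T).get? a0 ≠ none := by
  unfold algStep
  split_ifs <;> simp [PySem.Dict.get?_insert_self]

lemma algFold_eq_foldl_algStep (as : List String) (T : PySem.Set String)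
    (d : PySem.Dict String (PySem.Set String)) :
    algFold as T d = as.foldl (fun d a => algStep d a T) d := rfl

lemma algFold_memV (as : List String) (T : PySem.Set String)
    (d : PySem.Dict String (PySem.Set String)) (a x : String) :
    memV (algFold as T d) a x ↔
      if a ∈ as then x ∈ T ∧ (memV d a x ∨ d.get? a = none) else memV d a x := by
  rw [algFold_eq_foldl_algStep]
  induction as generalizing d with
  | nil => simp
  | cons a0 as ih =>
      rw [List.foldl_cons, ih]
      by_cases h : a = a0
      · subst h
        have hs := algStep_memV d a T x
        have hne := algStep_get?_self_ne_none d a T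
        have hin : a ∈ a :: as := by simp
        by_cases hm : a ∈ as
        · rw [if_pos hm, if_pos hin, hs]
          have h0 : ((algStep d a T).get? a = none) ↔ False := by simp [hne]
          rw [h0]
          tauto
        · rw [if_neg hm, if_pos hin]
          exact hs
      · have hg := algStep_get?_ne d a0 T h
        have hmv : memV (algStep d a0 T) a x ↔ memV d a x := by unfold memV; rw [hg]
        have hcons : (a ∈ a0 :: as) ↔ a ∈ as := by simp [List.mem_cons, h]
        by_cases hm : a ∈ as <;> simp [hm, hcons, hmv, hg]

lemma algFold_keys_nodup (as : List String) (T : PySem.Set String)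
    (d : PySem.Dict String (PySem.Set String)) (h : d.keys.Nodup) :
    (algFold as T d).keys.Nodup := by
  induction as generalizing d with
  | nil => exact h
  | cons a0 as ih =>
      simp only [algFold, List.foldl_cons] at *
      apply ih
      split_ifs <;> exact PySem.Dict.nodup_keys_insert _ _ _ h

lemma foldAI_memV (rs : List (List String × List String))
    (d : PySem.Dict String (PySem.Set String)) (a x : String) :
    memV (foldAI d rs) a x ↔
      (memV d a x ∨ (d.get? a = none ∧ HasAlg rs a)) ∧ InAll rs a x := by
  induction rs generalizing d with
  | nil => simp [foldAI, HasAlg, InAll, memV] <;> tauto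
  | cons r rs ih =>
      simp only [foldAI, List.foldl_cons] at *
      rw [ih]
      unfold stepAI
      rw [algFold_memV, algFold_none]
      have hh : HasAlg (r :: rs) a ↔ a ∈ r.2 ∨ HasAlg rs a := by simp [HasAlg]
      have hi : InAll (r :: rs) a x ↔ (a ∈ r.2 → x ∈ r.1) ∧ InAll rs a x := by
        simp [InAll]
      rw [hh, hi, PySem.Set.mem_ofList]
      by_cases hm : a ∈ r.2 <;> simp [hm] <;> tauto

lemma foldAI_keys_nodup (rs : List (List String × List String))
    (d : PySem.Dict String (PySem.Set String)) (h : d.keys.Nodup) :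
    (foldAI d rs).keys.Nodup := by
  induction rs generalizing d with
  | nil => exact h
  | cons r rs ih => exact ih _ (algFold_keys_nodup _ _ _ h)

lemma mem_diff_fold (kvs : List (String × PySem.Set String)) (s : PySem.Set String)
    (x : String) :
    x ∈ kvs.foldl (fun s kv => PySem.Set.diff s kv.2) s ↔ x ∈ s ∧ ∀ kv ∈ kvs, x ∉ kv.2 := by
  induction kvs generalizing s with
  | nil => simp
  | cons kv kvs ih =>
      simp only [List.foldl_cons] at *
      rw [ih, PySem.Set.mem_diff]
      simp
      tauto

lemma nodup_diff_fold (kvs : List (String × PySem.Set String)) (s : PySem.Set String)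
    (h : s.Nodup) : (kvs.foldl (fun s kv => PySem.Set.diff s kv.2) s).Nodup := by
  induction kvs generalizing s with
  | nil => exact h
  | cons kv kvs ih => exact ih _ (PySem.Set.nodup_diff _ _ h)

-- the common semantic predicate: x is a candidate ingredient for some allergen
def FlaggedP (rs : List (List String × List String)) (x : String) : Prop :=
  ∃ a, HasAlg rs a ∧ InAll rs a x

lemma mem_safe (rs : List (List String × List String)) (x : String) :
    x ∈ ((foldAI PySem.Dict.empty rs).items.foldl (fun s kv => PySem.Set.diff s kv.2)
        (foldAll PySem.Set.empty rs)) ↔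
      x ∈ flatToks rs ∧ ¬ FlaggedP rs x := by
  rw [mem_diff_fold, mem_foldAll]
  have hk := foldAI_keys_nodup rs PySem.Dict.empty (by exact PySem.Dict.nodup_keys_empty)
  constructor
  · rintro ⟨hx, hall⟩
    refine ⟨by simpa using hx, ?_⟩
    rintro ⟨a, ha⟩
    have : memV (foldAI PySem.Dict.empty rs) a x := by
      rw [foldAI_memV]
      simp [PySem.Dict.get?_empty, memV]
      tauto
    obtain ⟨s, hs, hxs⟩ := this
    exact hall (a, s) ((PySem.Dict.get?_eq_some_iff_mem_items _ _ _ hk).mp hs) hxs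
  · rintro ⟨hx, hun⟩
    refine ⟨Or.inr hx, ?_⟩
    rintro ⟨a, s⟩ hmem hxs
    have hs := PySem.Dict.get?_of_mem_items _ hmem hk
    have : memV (foldAI PySem.Dict.empty rs) a x := ⟨s, hs, hxs⟩
    rw [foldAI_memV] at this
    simp [PySem.Dict.get?_empty, memV] at this
    exact hun ⟨a, this.1, this.2⟩

-- ===== B side =====

def candFold (rs : List (List String × List String)) (a : String)
    (c : Option (PySem.Set String)) : Option (PySem.Set String) :=
  rs.foldl
    (fun c r =>
      if r.2.contains a then
        match c with
        | none => some (PySem.Set.ofList r.1)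
        | some s => some (PySem.Set.inter s (PySem.Set.ofList r.1))
      else c) c

def memO (c : Option (PySem.Set String)) (x : String) : Prop := ∃ s, c = some s ∧ x ∈ s

lemma candFold_memO (rs : List (List String × List String)) (a x : String)
    (c : Option (PySem.Set String)) :
    memO (candFold rs a c) x ↔ ((memO c x ∨ (c = none ∧ HasAlg rs a)) ∧ InAll rs a x) := by
  induction rs generalizing c with
  | nil => simp [candFold, HasAlg, InAll, memO] <;> tauto
  | cons r rs ih =>
      simp only [candFold, List.foldl_cons] at *
      rw [ih]
      have hh : HasAlg (r :: rs) a ↔ a ∈ r.2 ∨ HasAlg rs a := by simp [HasAlg]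
      have hi : InAll (r :: rs) a x ↔ (a ∈ r.2 → x ∈ r.1) ∧ InAll rs a x := by simp [InAll]
      rw [hh, hi]
      by_cases hm : a ∈ r.2
      · rw [if_pos (by simpa [List.contains_iff_mem] using hm)]
        cases c <;> simp [memO, hm, PySem.Set.mem_ofList, PySem.Set.mem_inter] <;> tauto
      · rw [if_neg (by simpa [List.contains_iff_mem] using hm)]
        simp [hm] <;> tauto

lemma mem_flagFold (rs : List (List String × List String)) (as : List String)
    (u : PySem.Set String) (x : String) :
    (x ∈ as.foldl
        (fun u a =>
          match candFold rs a none with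
          | none => u
          | some s => PySem.Set.union u s) u) ↔
      x ∈ u ∨ ∃ a ∈ as, memO (candFold rs a none) x := by
  induction as generalizing u with
  | nil => simp
  | cons a0 as ih =>
      simp only [List.foldl_cons] at *
      rw [ih]
      cases h : candFold rs a0 none with
      | none => simp [h, memO]
      | some s => simp [h, memO, PySem.Set.mem_union] <;> tauto

lemma countP_sum_flat (rs : List (List String × List String)) (p : String → Bool) :
    (rs.map (fun r => (r.1.countP p : Int))).sum = ((flatToks rs).countP p : Int) := by
  unfold flatToks
  rw [List.countP_flatMap]
  induction rs with
  | nil => simp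
  | cons r rs ih => simp [ih] <;> push_cast <;> ring

lemma sum_count_eq_countP (S toks : List String) (p : String → Bool) (hS : S.Nodup)
    (hmem : ∀ x, x ∈ S ↔ x ∈ toks ∧ p x = true) :
    (S.map (fun s => toks.count s)).sum = toks.countP p := by
  have hperm : S.Perm (toks.dedup.filter p) := by
    apply List.perm_of_nodup_nodup_toFinset_eq hS (List.Nodup.filter _ toks.nodup_dedup)
    ext y
    simp [List.mem_toFinset, List.mem_dedup, hmem y]
  calc (S.map (fun s => toks.count s)).sum
      = ((toks.dedup.filter p).map (fun s => toks.count s)).sum :=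
        List.Perm.sum_eq (List.Perm.map _ hperm)
    _ = toks.countP p := List.sum_map_count_dedup_filter_eq_countP p toks

lemma part1_alt_unfold (lines : List String) (full : Bool) :
    part1_alt lines full =
      (let rs := lines.map parseLine
       let flagged := (PySem.List.dedup (rs.flatMap (fun r => r.2))).foldl
          (fun u a =>
            match candFold rs a none with
            | none => u
            | some s => PySem.Set.union u s) PySem.Set.empty
       rs.foldl (fun acc r => acc + (r.1.countP (fun t => !(PySem.Set.contains flagged t)) : Int)) 0) := by
  rfl

-- ===== VERDICT (by name: the statement is the Claim_ definition above) =====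
theorem part1_spec : Claim_equal_part1 := by
  intro lines full _ _
  unfold Spec_part1
  rw [part1_eq_finalA, part1_alt_unfold]
  set rs := lines.map parseLine with hrs
  simp only [finalA, foldl_triple]
  set flagged := (PySem.List.dedup (rs.flatMap (fun r => r.2))).foldl
      (fun u a =>
        match candFold rs a none with
        | none => u
        | some s => PySem.Set.union u s) PySem.Set.empty with hu
  set p : String → Bool := fun t => !(PySem.Set.contains flagged t) with hp
  -- characterize flagged
  have hflag : ∀ x, x ∈ flagged ↔ FlaggedP rs x := by
    intro x
    rw [hu, mem_flagFold]
    constructor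
    · rintro (hx | ⟨a, ha, hm⟩)
      · simp at hx
      · rw [candFold_memO] at hm
        simp [memO] at hm
        exact ⟨a, hm.1, hm.2⟩
    · rintro ⟨a, hha, hia⟩
      right
      refine ⟨a, ?_, ?_⟩
      · rw [PySem.List.mem_dedup, List.mem_flatMap]
        obtain ⟨r, hr, har⟩ := hha
        exact ⟨r, hr, har⟩
      · rw [candFold_memO]; tauto
  -- B's side as countP
  rw [PySem.List.foldl_add, countP_sum_flat]
  -- A's side
  set safe := ((foldAI PySem.Dict.empty rs).items.foldl (fun s kv => PySem.Set.diff s kv.2)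
      (foldAll PySem.Set.empty rs)) with hsafe
  have hsnd : safe.Nodup := nodup_diff_fold _ _ (nodup_foldAll _ _ (by simp [PySem.Set.empty]))
  have hmemS : ∀ x, x ∈ safe ↔ x ∈ flatToks rs ∧ p x = true := by
    intro x
    rw [hsafe, mem_safe]
    have : p x = true ↔ ¬ FlaggedP rs x := by
      rw [hp]
      simp only [Bool.not_eq_eq_eq_not, Bool.not_true]
      rw [← Bool.not_eq_true, not_iff_not.mpr (Iff.rfl)]
      rw [PySem.Set.contains_iff, hflag x]
    tauto
  have hcnt : (safe.map (fun s => (foldCnt PySem.Dict.empty rs).getD s 0)) =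
      safe.map (fun s => ((flatToks rs).count s : Int)) := by
    apply List.map_congr_left
    intro s hs
    rw [foldCnt_getD]
    simp [PySem.Dict.getD_empty]
  rw [hcnt]
  have : (safe.map (fun s => ((flatToks rs).count s : Int))).sum
      = (((safe.map (fun s => (flatToks rs).count s)).sum : Nat) : Int) := by
    rw [Nat.cast_list_sum, List.map_map]; rfl
  rw [this, sum_count_eq_countP safe (flatToks rs) p hsnd hmemS]
  simp
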